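-- pv_equiv track=rewrite | github.com/boopathi-376/Hybrid-Legal-AI-Chatbot | ingest.py | get_metadata_for_page
-- ===== SOURCE A (Python) =====
-- TOC_MAPPING = [
--     {"start": 9, "end": 10, "domain": "General Overview", "chapter": "Chapter 1: Why Know the Law?", "act": None},
--     {"start": 11, "end": 13, "domain": "General Overview", "chapter": "Chapter 2: A Quick Look at the Indian Legal System", "act": None},
--     {"start": 14, "end": 24, "domain": "Constitutional and Judicial Framework", "chapter": "Chapter 3: Introduction to the Constitution of India", "act": "Constitution of India"},
--     {"start": 25, "end": 37, "domain": "Constitutional and Judicial Framework", "chapter": "Chapter 4: Fundamental Rights and Duties", "act": "Constitution of India"},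
--     {"start": 38, "end": 49, "domain": "Constitutional and Judicial Framework", "chapter": "Chapter 5: The Judicial System of India", "act": "Constitution of India"},
--     {"start": 50, "end": 75, "domain": "Core Legal Domains", "chapter": "Chapter 6: Criminal Law", "act": "Indian Penal Code (IPC), Code of Criminal Procedure (CrPC)"},
--     {"start": 76, "end": 87, "domain": "Core Legal Domains", "chapter": "Chapter 7: Civil Law", "act": "Code of Civil Procedure (CPC), Contract Law, Law of Torts"},
--     {"start": 88, "end": 101, "domain": "Core Legal Domains", "chapter": "Chapter 8: Family Law", "act": "Hindu Law, Muslim Law, Christian Law, Special Marriage Act"},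
--     {"start": 102, "end": 114, "domain": "Core Legal Domains", "chapter": "Chapter 9: Property Law", "act": "Transfer of Property Act, Succession Laws"},
--     {"start": 115, "end": 136, "domain": "Specialized Laws and Rights", "chapter": "Chapter 10: Labour and Employment Law", "act": "Industrial Disputes Act, Factories Act, etc."},
--     {"start": 137, "end": 147, "domain": "Specialized Laws and Rights", "chapter": "Chapter 11: Taxation and Finance", "act": "Income Tax Act, GST"},
--     {"start": 148, "end": 171, "domain": "Specialized Laws and Rights", "chapter": "Chapter 12: Consumer Protection and Rights", "act": "Consumer Protection Act"},
--     {"start": 172, "end": 186, "domain": "Specialized Laws and Rights", "chapter": "Chapter 13: Intellectual Property Rights", "act": "Patents, Trademarks, Copyrights"},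
--     {"start": 187, "end": 199, "domain": "Specialized Laws and Rights", "chapter": "Chapter 14: Environmental Laws", "act": "Environment (Protection) Act, etc."},
--     {"start": 200, "end": 206, "domain": "Specialized Laws and Rights", "chapter": "Chapter 15: Cyber Law in India", "act": "Information Technology Act"},
--     {"start": 207, "end": 220, "domain": "Reference and Conclusion", "chapter": "Chapter 16: How to Navigate the Legal System", "act": None},
--     {"start": 221, "end": 222, "domain": "Reference and Conclusion", "chapter": "End Note", "act": None},
-- ]
--
-- def get_metadata_for_page(page_num):
--     for entry in TOC_MAPPING:
--         if entry["start"] <= page_num <= entry["end"]: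
--             return {
--                 "doc_title": "Indian Law For A Common Man",
--                 "domain": entry["domain"],
--                 "chapter_header": entry["chapter"],
--                 "act_name": entry["act"]
--             }
--     return {
--         "doc_title": "Indian Law For A Common Man",
--         "domain": "General",
--         "chapter_header": "Unknown Chapter",
--         "act_name": None
--     }
-- ===== SOURCE B (Python) =====
-- _DOC = "Indian Law For A Common Man"
--
-- # The TOC intervals are contiguous from page 9 to page 222, so only the
-- # last page of each chapter is needed, plus the metadata in a parallel list.
-- _ENDS = [10, 13, 24, 37, 49, 75, 87, 101, 114, 136, 147, 171, 186, 199, 206, 220, 222]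
--
-- _INFO = [
--     ("General Overview", "Chapter 1: Why Know the Law?", None),
--     ("General Overview", "Chapter 2: A Quick Look at the Indian Legal System", None),
--     ("Constitutional and Judicial Framework", "Chapter 3: Introduction to the Constitution of India", "Constitution of India"),
--     ("Constitutional and Judicial Framework", "Chapter 4: Fundamental Rights and Duties", "Constitution of India"),
--     ("Constitutional and Judicial Framework", "Chapter 5: The Judicial System of India", "Constitution of India"),
--     ("Core Legal Domains", "Chapter 6: Criminal Law", "Indian Penal Code (IPC), Code of Criminal Procedure (CrPC)"),
--     ("Core Legal Domains", "Chapter 7: Civil Law", "Code of Civil Procedure (CPC), Contract Law, Law of Torts"),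
--     ("Core Legal Domains", "Chapter 8: Family Law", "Hindu Law, Muslim Law, Christian Law, Special Marriage Act"),
--     ("Core Legal Domains", "Chapter 9: Property Law", "Transfer of Property Act, Succession Laws"),
--     ("Specialized Laws and Rights", "Chapter 10: Labour and Employment Law", "Industrial Disputes Act, Factories Act, etc."),
--     ("Specialized Laws and Rights", "Chapter 11: Taxation and Finance", "Income Tax Act, GST"),
--     ("Specialized Laws and Rights", "Chapter 12: Consumer Protection and Rights", "Consumer Protection Act"),
--     ("Specialized Laws and Rights", "Chapter 13: Intellectual Property Rights", "Patents, Trademarks, Copyrights"),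
--     ("Specialized Laws and Rights", "Chapter 14: Environmental Laws", "Environment (Protection) Act, etc."),
--     ("Specialized Laws and Rights", "Chapter 15: Cyber Law in India", "Information Technology Act"),
--     ("Reference and Conclusion", "Chapter 16: How to Navigate the Legal System", None),
--     ("Reference and Conclusion", "End Note", None),
-- ]
--
-- def get_metadata_for_page(page_num):
--     if 9 <= page_num <= 222:
--         # bisect_left by hand: first index whose chapter-end >= page_num
--         lo, hi = 0, len(_ENDS)
--         while lo < hi:
--             mid = (lo + hi) // 2
--             if _ENDS[mid] < page_num:
--                 lo = mid + 1
--             else: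
--                 hi = mid
--         domain, chapter, act = _INFO[lo]
--     else:
--         domain, chapter, act = "General", "Unknown Chapter", None
--     return {
--         "doc_title": _DOC,
--         "domain": domain,
--         "chapter_header": chapter,
--         "act_name": act,
--     }
-- ===== Notes on version B (the rewrite author's own statement) =====
-- stated objective: alternative
-- what changed: Replaces A's sequential scan of (start,end) intervals by a range pre-check plus a hand-written bisect_left binary search over a parallel list of chapter-end pages (the intervals are contiguous 9..222, so the start values and the per-entry interval test disappear).
import Mathlib
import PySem

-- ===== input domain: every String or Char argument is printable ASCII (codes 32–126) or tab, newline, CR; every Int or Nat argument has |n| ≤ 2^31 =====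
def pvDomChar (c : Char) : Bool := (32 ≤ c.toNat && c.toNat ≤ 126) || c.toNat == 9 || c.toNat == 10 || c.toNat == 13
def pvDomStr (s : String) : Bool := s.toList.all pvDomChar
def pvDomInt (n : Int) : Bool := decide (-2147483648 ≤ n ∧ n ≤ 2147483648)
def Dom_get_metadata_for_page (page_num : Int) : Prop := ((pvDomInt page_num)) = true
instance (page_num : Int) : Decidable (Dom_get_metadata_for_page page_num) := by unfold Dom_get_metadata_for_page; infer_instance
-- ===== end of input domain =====

-- B replaces A's sequential interval scan by a range pre-check plus a binary search over
-- the chapter-end pages kept in parallel lists (the intervals are contiguous 9..222).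

-- ===== PORT A =====
-- TOC_MAPPING as (start, end, domain, chapter, act)
def pvToc : List (Int × Int × String × String × Option String) := [
  (9, 10, "General Overview", "Chapter 1: Why Know the Law?", none),
  (11, 13, "General Overview", "Chapter 2: A Quick Look at the Indian Legal System", none),
  (14, 24, "Constitutional and Judicial Framework", "Chapter 3: Introduction to the Constitution of India", some "Constitution of India"),
  (25, 37, "Constitutional and Judicial Framework", "Chapter 4: Fundamental Rights and Duties", some "Constitution of India"),
  (38, 49, "Constitutional and Judicial Framework", "Chapter 5: The Judicial System of India", some "Constitution of India"),
  (50, 75, "Core Legal Domains", "Chapter 6: Criminal Law", some "Indian Penal Code (IPC), Code of Criminal Procedure (CrPC)"),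
  (76, 87, "Core Legal Domains", "Chapter 7: Civil Law", some "Code of Civil Procedure (CPC), Contract Law, Law of Torts"),
  (88, 101, "Core Legal Domains", "Chapter 8: Family Law", some "Hindu Law, Muslim Law, Christian Law, Special Marriage Act"),
  (102, 114, "Core Legal Domains", "Chapter 9: Property Law", some "Transfer of Property Act, Succession Laws"),
  (115, 136, "Specialized Laws and Rights", "Chapter 10: Labour and Employment Law", some "Industrial Disputes Act, Factories Act, etc."),
  (137, 147, "Specialized Laws and Rights", "Chapter 11: Taxation and Finance", some "Income Tax Act, GST"),
  (148, 171, "Specialized Laws and Rights", "Chapter 12: Consumer Protection and Rights", some "Consumer Protection Act"),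
  (172, 186, "Specialized Laws and Rights", "Chapter 13: Intellectual Property Rights", some "Patents, Trademarks, Copyrights"),
  (187, 199, "Specialized Laws and Rights", "Chapter 14: Environmental Laws", some "Environment (Protection) Act, etc."),
  (200, 206, "Specialized Laws and Rights", "Chapter 15: Cyber Law in India", some "Information Technology Act"),
  (207, 220, "Reference and Conclusion", "Chapter 16: How to Navigate the Legal System", none),
  (221, 222, "Reference and Conclusion", "End Note", none)]

def pvMeta (d c : String) (a : Option String) : List (String × Option String) :=
  [("doc_title", some "Indian Law For A Common Man"), ("domain", some d),
   ("chapter_header", some c), ("act_name", a)]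

def pvDefault : List (String × Option String) :=
  [("doc_title", some "Indian Law For A Common Man"), ("domain", some "General"),
   ("chapter_header", some "Unknown Chapter"), ("act_name", none)]

def pvLoopA (p : Int) : List (Int × Int × String × String × Option String) → List (String × Option String)
  | [] => pvDefault
  | (s, e, d, c, a) :: rest => if s ≤ p ∧ p ≤ e then pvMeta d c a else pvLoopA p rest

def get_metadata_for_page (page_num : Int) : List (String × Option String) :=
  pvLoopA page_num pvToc

-- ===== PORT B =====
def bDoc : String := "Indian Law For A Common Man"

def bEnds : List Int := [10, 13, 24, 37, 49, 75, 87, 101, 114, 136, 147, 171, 186, 199, 206, 220, 222]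

def bInfo : List (String × String × Option String) := [
  ("General Overview", "Chapter 1: Why Know the Law?", none),
  ("General Overview", "Chapter 2: A Quick Look at the Indian Legal System", none),
  ("Constitutional and Judicial Framework", "Chapter 3: Introduction to the Constitution of India", some "Constitution of India"),
  ("Constitutional and Judicial Framework", "Chapter 4: Fundamental Rights and Duties", some "Constitution of India"),
  ("Constitutional and Judicial Framework", "Chapter 5: The Judicial System of India", some "Constitution of India"),
  ("Core Legal Domains", "Chapter 6: Criminal Law", some "Indian Penal Code (IPC), Code of Criminal Procedure (CrPC)"),
  ("Core Legal Domains", "Chapter 7: Civil Law", some "Code of Civil Procedure (CPC), Contract Law, Law of Torts"),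
  ("Core Legal Domains", "Chapter 8: Family Law", some "Hindu Law, Muslim Law, Christian Law, Special Marriage Act"),
  ("Core Legal Domains", "Chapter 9: Property Law", some "Transfer of Property Act, Succession Laws"),
  ("Specialized Laws and Rights", "Chapter 10: Labour and Employment Law", some "Industrial Disputes Act, Factories Act, etc."),
  ("Specialized Laws and Rights", "Chapter 11: Taxation and Finance", some "Income Tax Act, GST"),
  ("Specialized Laws and Rights", "Chapter 12: Consumer Protection and Rights", some "Consumer Protection Act"),
  ("Specialized Laws and Rights", "Chapter 13: Intellectual Property Rights", some "Patents, Trademarks, Copyrights"),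
  ("Specialized Laws and Rights", "Chapter 14: Environmental Laws", some "Environment (Protection) Act, etc."),
  ("Specialized Laws and Rights", "Chapter 15: Cyber Law in India", some "Information Technology Act"),
  ("Reference and Conclusion", "Chapter 16: How to Navigate the Legal System", none),
  ("Reference and Conclusion", "End Note", none)]

-- the while-loop of Source B's hand-written bisect_left; fuel = list length makes it total
def bSearch (p : Int) : Nat → Nat → Nat → Nat
  | 0, lo, _ => lo
  | f + 1, lo, hi =>
    if lo < hi then
      let mid := (lo + hi) / 2
      if bEnds.getD mid 0 < p then bSearch p f (mid + 1) hi
      else bSearch p f lo mid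
    else lo

def get_metadata_for_page_alt (page_num : Int) : List (String × Option String) :=
  let t : String × String × Option String :=
    if 9 ≤ page_num ∧ page_num ≤ 222 then
      bInfo.getD (bSearch page_num bEnds.length 0 bEnds.length) ("", "", none)
    else ("General", "Unknown Chapter", none)
  [("doc_title", some bDoc), ("domain", some t.1),
   ("chapter_header", some t.2.1), ("act_name", t.2.2)]

-- ===== PRECONDITION & SPEC =====
def Spec_get_metadata_for_page (page_num : Int) (out : List (String × Option String)) : Prop := out = get_metadata_for_page_alt page_num
instance (page_num : Int) (out : List (String × Option String)) : Decidable (Spec_get_metadata_for_page page_num out) := by unfold Spec_get_metadata_for_page; infer_instance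

-- ===== CLAIM (what is proved, stated in full; the proofs are below) =====
def Claim_equal_get_metadata_for_page : Prop := ∀ (page_num : Int), Dom_get_metadata_for_page page_num → Spec_get_metadata_for_page page_num (get_metadata_for_page page_num)

-- ===== LEMMAS AND PROOFS =====

-- A's scan returns the default when no interval contains p
theorem pv_loopA_none (p : Int) (L : List (Int × Int × String × String × Option String))
    (h : ∀ e ∈ L, ¬ (e.1 ≤ p ∧ p ≤ e.2.1)) : pvLoopA p L = pvDefault := by
  induction L with
  | nil => rfl
  | cons e rest ih =>
    obtain ⟨s, en, d, c, a⟩ := e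
    rw [pvLoopA, if_neg (h _ (List.mem_cons_self ..))]
    exact ih fun x hx => h x (List.mem_cons_of_mem _ hx)

-- outside the covered range 9..222 both ports return the default metadata
theorem pv_outside (p : Int) (h : p < 9 ∨ 222 < p) :
    get_metadata_for_page p = get_metadata_for_page_alt p := by
  have htoc : ∀ e ∈ pvToc, (9 : Int) ≤ e.1 ∧ e.2.1 ≤ 222 := by decide
  unfold get_metadata_for_page get_metadata_for_page_alt
  rw [pv_loopA_none p pvToc (fun e he hc => by have := htoc e he; omega)]
  rw [if_neg (by omega)]
  rfl

set_option maxRecDepth 8000 in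
set_option maxHeartbeats 1000000 in
theorem pv_inside : ∀ p ∈ Finset.Icc (9 : Int) 222,
    get_metadata_for_page p = get_metadata_for_page_alt p := by decide

-- ===== VERDICT (by name: the statement is the Claim_ definition above) =====
theorem get_metadata_for_page_spec : Claim_equal_get_metadata_for_page := by
  intro p _
  unfold Spec_get_metadata_for_page
  rcases lt_or_ge p 9 with h | h1
  · exact pv_outside p (Or.inl h)
  rcases le_or_gt p 222 with h2 | h2
  · exact pv_inside p (Finset.mem_Icc.mpr ⟨h1, h2⟩)
  · exact pv_outside p (Or.inr h2)
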